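-- pv_equiv track=rewrite | github.com/mehad605/Bangla_Typer | scripts/process_captions.py | assemble_final_text
-- ===== SOURCE A (Python) =====
-- _BN_NUMS = [
--     "",
--     "১",
--     "২",
--     "৩",
--     "৪",
--     "৫",
--     "৬",
--     "৭",
--     "৮",
--     "৯",
--     "১০",
--     "১১",
--     "১২",
--     "১৩",
--     "১৪",
--     "১৫",
--     "১৬",
--     "১৭",
--     "১৮",
--     "১৯",
--     "২০",
--     "২১",
--     "২২",
--     "২৩",
--     "২৪",
--     "২৫",
--     "২৬",
--     "২৭",
--     "২৮",
--     "২৯",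
--     "৩০",
--     "৩১",
--     "৩২",
--     "৩৩",
--     "৩৪",
--     "৩৫",
--     "৩৬",
--     "৩৭",
--     "৩৮",
--     "৩৯",
--     "৪০",
--     "৪১",
--     "৪২",
--     "৪৩",
--     "৪৪",
--     "৪৫",
--     "৪৬",
--     "৪৭",
--     "৪৮",
--     "৪৯",
--     "৫০",
-- ]
--
-- def _bn(n: int) -> str:
--     return _BN_NUMS[n] if n < len(_BN_NUMS) else str(n)
--
-- PAGES_PER_PART = 6
--
-- def assemble_final_text(pages: list[dict]) -> str:
--     """
--     Assemble pages into book structure (Parts + Pages) without any AI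
--     restructuring. A new Part is opened every PAGES_PER_PART pages.
--     """
--     out: list[str] = []
--     part_num = 1
--     page_num = 1
--
--     out.append(f"==**part {_bn(part_num)}**==")
--
--     for i, pg in enumerate(pages):
--         # Close current part and open a new one every PAGES_PER_PART pages
--         if i > 0 and i % PAGES_PER_PART == 0:
--             out.append(f"==**part {_bn(part_num)}**==")
--             part_num += 1
--             out.append(f"==**part {_bn(part_num)}**==")
--
--         plabel = f"page{_bn(page_num)}"
--         out.append(f"==%%{plabel}%%==")
--
--         for sent in pg["sentences"]:
--             out.append(" ".join(sent))
--
--         out.append(f"==%%{plabel}%%==")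
--         page_num += 1
--
--     out.append(f"==**part {_bn(part_num)}**==")
--
--     return "\n".join(out)
-- ===== SOURCE B (Python) =====
-- # B: grouped re-implementation — compute the number of parts up front, then emit
-- # each part's header, its slice of up to PAGES_PER_PART pages, and its footer.
-- _BN_NUMS = [
--     "", "১", "২", "৩", "৪", "৫", "৬", "৭", "৮", "৯", "১০",
--     "১১", "১২", "১৩", "১৪", "১৫", "১৬", "১৭", "১৮", "১৯", "২০",
--     "২১", "২২", "২৩", "২৪", "২৫", "২৬", "২৭", "২৮", "২৯", "৩০",
--     "৩১", "৩২", "৩৩", "৩৪", "৩৫", "৩৬", "৩৭", "৩৮", "৩৯", "৪০",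
--     "৪১", "৪২", "৪৩", "৪৪", "৪৫", "৪৬", "৪৭", "৪৮", "৪৯", "৫০",
-- ]
--
-- def _bn(n: int) -> str:
--     return _BN_NUMS[n] if n < len(_BN_NUMS) else str(n)
--
-- PAGES_PER_PART = 6
--
-- def assemble_final_text(pages: list[dict]) -> str:
--     num_parts = max(1, (len(pages) + PAGES_PER_PART - 1) // PAGES_PER_PART)
--     lines: list[str] = []
--     for p in range(num_parts):
--         hdr = f"==**part {_bn(p + 1)}**=="
--         lines.append(hdr)
--         for j, pg in enumerate(pages[p * PAGES_PER_PART:(p + 1) * PAGES_PER_PART]):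
--             plabel = f"page{_bn(p * PAGES_PER_PART + j + 1)}"
--             lines.append(f"==%%{plabel}%%==")
--             for sent in pg["sentences"]:
--                 lines.append(" ".join(sent))
--             lines.append(f"==%%{plabel}%%==")
--         lines.append(hdr)
--     return "\n".join(lines)
-- ===== Notes on version B (the rewrite author's own statement) =====
-- stated objective: alternative
-- what changed: Replaces A's flat enumerate loop with its modulo-6 part-boundary test and running part counter by a grouped traversal: B computes the number of parts up front with ceiling division and emits each part's header, its 6-page slice, and its footer.
import Mathlib
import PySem

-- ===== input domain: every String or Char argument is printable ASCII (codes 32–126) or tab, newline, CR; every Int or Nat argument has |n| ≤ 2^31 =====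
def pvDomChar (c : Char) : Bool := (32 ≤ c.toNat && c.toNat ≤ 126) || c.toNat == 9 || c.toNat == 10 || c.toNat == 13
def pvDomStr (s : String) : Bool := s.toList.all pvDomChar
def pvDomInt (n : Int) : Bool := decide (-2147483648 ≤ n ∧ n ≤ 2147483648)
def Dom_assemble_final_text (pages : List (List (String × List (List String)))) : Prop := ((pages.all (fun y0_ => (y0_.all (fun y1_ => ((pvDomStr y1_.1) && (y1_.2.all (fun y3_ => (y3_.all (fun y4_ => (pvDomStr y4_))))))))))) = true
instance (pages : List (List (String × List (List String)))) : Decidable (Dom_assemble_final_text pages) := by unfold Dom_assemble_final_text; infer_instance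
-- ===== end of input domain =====

-- B regroups the flat modulo-boundary loop: it computes the number of parts up front and
-- emits each part's header, its slice of up to 6 pages, and its footer (objective: alternative).

-- shared module constant _BN_NUMS and helper _bn (identical in Source A and Source B)
def bnNums : List String :=
  ["", "১", "২", "৩", "৪", "৫", "৬", "৭", "৮", "৯", "১০",
   "১১", "১২", "১৩", "১৪", "১৫", "১৬", "১৭", "১৮", "১৯", "২০",
   "২১", "২২", "২৩", "২৪", "২৫", "২৬", "২৭", "২৮", "২৯", "৩০",
   "৩১", "৩২", "৩৩", "৩৪", "৩৫", "৩৬", "৩৭", "৩৮", "৩৯", "৪০",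
   "৪১", "৪২", "৪৩", "৪৪", "৪৫", "৪৬", "৪৭", "৪৮", "৪৯", "৫০"]

-- _bn is only ever called with n ≥ 1 here, so the pyGetD default "" is never used
def bn (n : Int) : String :=
  if n < 51 then PySem.List.pyGetD bnNums n "" else PySem.Int.toStr n

-- ===== PORT A =====
-- the body of A's 'for i, pg in enumerate(pages)' loop; state = (out, part_num, page_num)
def stepA (st : List String × Int × Int) (ipg : Int × List (String × List (List String))) :
    List String × Int × Int :=
  match st, ipg with
  | (out, part_num, page_num), (i, pg) =>
    let (out, part_num) :=
      if 0 < i ∧ PySem.Int.mod i 6 = 0 then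
        (out ++ ["==**part " ++ bn part_num ++ "**==", "==**part " ++ bn (part_num + 1) ++ "**=="],
         part_num + 1)
      else (out, part_num)
    let plabel := "page" ++ bn page_num
    let out := out ++ ["==%%" ++ plabel ++ "%%=="]
    -- pg["sentences"]: first-match lookup; KeyError (none) is excluded by Pre_
    let out := out ++ (((PySem.Dict.mk pg).get? "sentences").getD []).map
                 (fun sent => PySem.Str.join " " sent)
    let out := out ++ ["==%%" ++ plabel ++ "%%=="]
    (out, part_num, page_num + 1)

def assemble_final_text (pages : List (List (String × List (List String)))) : String :=
  let st := (PySem.List.enumerate pages 0).foldl stepA (["==**part " ++ bn 1 ++ "**=="], 1, 1)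
  PySem.Str.join "\n" (st.1 ++ ["==**part " ++ bn st.2.1 ++ "**=="])

-- ===== PORT B =====
-- the body of B's inner 'for j, pg in enumerate(pages[p*6:(p+1)*6])' loop
def pageStepB (base : Int) (lines : List String) (jpg : Int × List (String × List (List String))) :
    List String :=
  match jpg with
  | (j, pg) =>
    let plabel := "page" ++ bn (base + j + 1)
    let lines := lines ++ ["==%%" ++ plabel ++ "%%=="]
    let lines := lines ++ (((PySem.Dict.mk pg).get? "sentences").getD []).map
                   (fun sent => PySem.Str.join " " sent)
    lines ++ ["==%%" ++ plabel ++ "%%=="]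

-- the body of B's outer 'for p in range(num_parts)' loop
def partStepB (pages : List (List (String × List (List String)))) (lines : List String) (p : Int) :
    List String :=
  let hdr := "==**part " ++ bn (p + 1) ++ "**=="
  let lines := lines ++ [hdr]
  let lines := (PySem.List.enumerate
                  (PySem.List.slice pages (some (p * 6)) (some ((p + 1) * 6))) 0).foldl
                 (pageStepB (p * 6)) lines
  lines ++ [hdr]

def assemble_final_text_alt (pages : List (List (String × List (List String)))) : String :=
  let numParts : Int := max 1 (PySem.Int.floordiv ((pages.length : Int) + 6 - 1) 6)
  PySem.Str.join "\n" ((PySem.List.pyRange 0 numParts 1).foldl (partStepB pages) [])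

-- ===== PRECONDITION & SPEC =====
-- Pre_ excludes exactly the pages without a "sentences" key, on which A raises KeyError.
def Pre_assemble_final_text (pages : List (List (String × List (List String)))) : Prop :=
  (pages.all (fun pg => ((PySem.Dict.mk pg).get? "sentences").isSome)) = true
instance (pages : List (List (String × List (List String)))) :
    Decidable (Pre_assemble_final_text pages) := by unfold Pre_assemble_final_text; infer_instance

def pvWitness_assemble_final_text : (List (List (String × List (List String)))) :=
  [[("sentences", [["hello", "world"], ["ok"]])], [("sentences", [])]]

def Spec_assemble_final_text (pages : List (List (String × List (List String)))) (out : String) :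
    Prop := out = assemble_final_text_alt pages
instance (pages : List (List (String × List (List String)))) (out : String) :
    Decidable (Spec_assemble_final_text pages out) := by
  unfold Spec_assemble_final_text; infer_instance

-- ===== CLAIM (what is proved, stated in full; the proofs are below) =====
def Claim_equal_assemble_final_text : Prop :=
  ∀ (pages : List (List (String × List (List String)))), Dom_assemble_final_text pages →
    Pre_assemble_final_text pages →
    Spec_assemble_final_text pages (assemble_final_text pages)

-- ===== LEMMAS AND PROOFS =====

-- the common "book structure" the two line lists are proved equal to
def hdrP (k : Int) : String := "==**part " ++ bn k ++ "**=="

def pageL (gn : Int) (pg : List (String × List (List String))) : List String :=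
  ["==%%" ++ ("page" ++ bn gn) ++ "%%=="] ++
    (((PySem.Dict.mk pg).get? "sentences").getD []).map (fun sent => PySem.Str.join " " sent) ++
    ["==%%" ++ ("page" ++ bn gn) ++ "%%=="]

def bodyL : Int → List (List (String × List (List String))) → List String
  | _, [] => []
  | gn, pg :: rest => pageL gn pg ++ bodyL (gn + 1) rest

-- the lines of the still-open part pn (header already emitted) followed by all later parts
def restL (pn gn : Int) (ps : List (List (String × List (List String)))) : List String :=
  if _h : ps.length ≤ 6 then bodyL gn ps ++ [hdrP pn]
  else bodyL gn (ps.take 6) ++ [hdrP pn, hdrP (pn + 1)] ++ restL (pn + 1) (gn + 6) (ps.drop 6)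
termination_by ps.length
decreasing_by simp_all; omega

theorem restL_le (pn gn : Int) (ps : List (List (String × List (List String))))
    (h : ps.length ≤ 6) : restL pn gn ps = bodyL gn ps ++ [hdrP pn] := by
  rw [restL]; simp [h]

theorem restL_gt (pn gn : Int) (ps : List (List (String × List (List String))))
    (h : ¬ ps.length ≤ 6) :
    restL pn gn ps =
      bodyL gn (ps.take 6) ++ [hdrP pn, hdrP (pn + 1)] ++ restL (pn + 1) (gn + 6) (ps.drop 6) := by
  rw [restL]; simp [h]

theorem stepA_no_boundary (out : List String) (pn gn i : Int)
    (pg : List (String × List (List String))) (h : ¬ (0 < i ∧ PySem.Int.mod i 6 = 0)) :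
    stepA (out, pn, gn) (i, pg) = (out ++ pageL gn pg, pn, gn + 1) := by
  simp only [stepA]
  rw [if_neg h]
  simp [pageL, List.append_assoc]

theorem stepA_boundary (out : List String) (pn gn i : Int)
    (pg : List (String × List (List String))) (h : 0 < i ∧ PySem.Int.mod i 6 = 0) :
    stepA (out, pn, gn) (i, pg) =
      (out ++ [hdrP pn, hdrP (pn + 1)] ++ pageL gn pg, pn + 1, gn + 1) := by
  simp only [stepA]
  rw [if_pos h]
  simp [pageL, hdrP, List.append_assoc]

theorem innerA (qs : List (List (String × List (List String)))) (i0 : Int)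
    (out : List String) (pn gn : Int)
    (hno : ∀ k : Nat, k < qs.length → ¬ (0 < i0 + k ∧ PySem.Int.mod (i0 + k) 6 = 0)) :
    (PySem.List.enumerate qs i0).foldl stepA (out, pn, gn) =
      (out ++ bodyL gn qs, pn, gn + qs.length) := by
  induction qs generalizing i0 out gn with
  | nil => simp [PySem.List.enumerate_nil, bodyL]
  | cons pg rest ih =>
    rw [PySem.List.enumerate_cons]
    have h0 := hno 0 (by simp)
    simp only [Nat.cast_zero, add_zero] at h0
    simp only [List.foldl_cons, stepA_no_boundary out pn gn i0 pg h0]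
    rw [ih (i0 + 1) _ (gn + 1) (fun k hk => by
      have := hno (k + 1) (by simpa using Nat.succ_lt_succ hk)
      push_cast at this ⊢
      convert this using 3 <;> ring_nf)]
    simp [bodyL, List.append_assoc]
    omega

theorem foldA (N : Nat) (ps : List (List (String × List (List String))))
    (hN : ps.length ≤ N) (i0 : Int) (out : List String) (pn gn : Int)
    (hpos : 0 < i0) (hmod : PySem.Int.mod i0 6 = 0) :
    ((PySem.List.enumerate ps i0).foldl stepA (out, pn, gn)).1 ++
        [hdrP ((PySem.List.enumerate ps i0).foldl stepA (out, pn, gn)).2.1] =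
      out ++ (if ps.isEmpty then [hdrP pn] else [hdrP pn, hdrP (pn + 1)] ++ restL (pn + 1) gn ps) := by
  induction N generalizing ps i0 out pn gn with
  | zero =>
    have : ps = [] := List.eq_nil_of_length_eq_zero (by omega)
    subst this; simp [PySem.List.enumerate_nil]
  | succ N ih =>
    match ps with
    | [] => simp [PySem.List.enumerate_nil]
    | pg :: rest =>
      have hmod6 : i0 % 6 = 0 := by
        rwa [PySem.Int.mod_eq_emod_of_pos (by omega)] at hmod
      rw [PySem.List.enumerate_cons]
      simp only [List.foldl_cons, stepA_boundary out pn gn i0 pg ⟨hpos, hmod⟩]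
      -- split rest into its first (at most) 5 pages and the remainder
      have hsplit : rest = rest.take 5 ++ rest.drop 5 := (List.take_append_drop 5 rest).symm
      conv_lhs => rw [hsplit, PySem.List.enumerate_append, List.foldl_append]
      rw [innerA (rest.take 5) (i0 + 1) _ (pn + 1) (gn + 1) (fun k hk => by
        have hk5 : k < 5 := lt_of_lt_of_le hk (by simp)
        intro ⟨_, hmk⟩
        rw [PySem.Int.mod_eq_emod_of_pos (by omega)] at hmk
        omega)]
      by_cases hlen : rest.length ≤ 5
      · have hdrop : rest.drop 5 = [] := by
          apply List.eq_nil_of_length_eq_zero; simp; omega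
        rw [hdrop]
        simp only [PySem.List.enumerate_nil, List.foldl_nil]
        have htk : rest.take 5 = rest := List.take_of_length_le hlen
        rw [htk]
        rw [restL_le (pn + 1) gn (pg :: rest) (by simp; omega)]
        simp [bodyL, List.append_assoc]
      · -- more than 6 pages in ps: recurse on the tail after the current part
        have hlt5 : (rest.take 5).length = 5 := by simp; omega
        have := ih (rest.drop 5) (by simp at hN ⊢; omega)
          (i0 + 1 + (rest.take 5).length)
          (out ++ [hdrP pn, hdrP (pn + 1)] ++ pageL gn pg ++ bodyL (gn + 1) (rest.take 5))
          (pn + 1) (gn + 1 + ((rest.take 5).length : Int))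
          (by omega)
          (by rw [PySem.Int.mod_eq_emod_of_pos (by omega)]; omega)
        rw [this]
        have hne : (rest.drop 5).isEmpty = false := by
          simp; omega
        rw [hne]
        rw [restL_gt (pn + 1) gn (pg :: rest) (by simp; omega)]
        have htake6 : (pg :: rest).take 6 = pg :: rest.take 5 := by simp
        have hdrop6 : (pg :: rest).drop 6 = rest.drop 5 := by simp
        rw [htake6, hdrop6]
        simp only [Bool.false_eq_true, if_false, hlt5, bodyL]
        push_cast
        ring_nf
        simp [List.append_assoc]

theorem topA (pages : List (List (String × List (List String)))) :
    ((PySem.List.enumerate pages 0).foldl stepA (["==**part " ++ bn 1 ++ "**=="], 1, 1)).1 ++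
        ["==**part " ++
          bn ((PySem.List.enumerate pages 0).foldl stepA
                (["==**part " ++ bn 1 ++ "**=="], 1, 1)).2.1 ++ "**=="] =
      hdrP 1 :: restL 1 1 pages := by
  have hsplit : pages = pages.take 6 ++ pages.drop 6 := (List.take_append_drop 6 pages).symm
  conv_lhs => rw [hsplit]
  rw [PySem.List.enumerate_append, List.foldl_append]
  rw [innerA (pages.take 6) 0 _ 1 1 (fun k hk => by
    have hk6 : k < 6 := lt_of_lt_of_le hk (by simp)
    intro ⟨hkpos, hmk⟩
    rw [PySem.Int.mod_eq_emod_of_pos (by omega)] at hmk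
    omega)]
  by_cases hlen : pages.length ≤ 6
  · have hdrop : pages.drop 6 = [] := by
      apply List.eq_nil_of_length_eq_zero; simp; omega
    have htk : pages.take 6 = pages := List.take_of_length_le hlen
    rw [hdrop, htk]
    simp only [PySem.List.enumerate_nil, List.foldl_nil]
    rw [restL_le 1 1 pages hlen]
    simp [hdrP]
  · have hlt6 : (pages.take 6).length = 6 := by simp; omega
    have := foldA (pages.drop 6).length (pages.drop 6) le_rfl
      ((0 : Int) + ((pages.take 6).length : Int))
      (["==**part " ++ bn 1 ++ "**=="] ++ bodyL 1 (pages.take 6)) 1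
      (1 + ((pages.take 6).length : Int))
      (by rw [hlt6]; norm_num)
      (by rw [hlt6, PySem.Int.mod_eq_emod_of_pos (by omega)]; norm_num)
    simp only [hdrP] at this
    rw [this]
    have hne : (pages.drop 6).isEmpty = false := by
      simp; omega
    rw [hne]
    rw [restL_gt 1 1 pages hlen]
    simp only [Bool.false_eq_true, if_false, hlt6, hdrP]
    norm_num

theorem pageStepB_eq (base : Int) (lines : List String) (j : Int)
    (pg : List (String × List (List String))) :
    pageStepB base lines (j, pg) = lines ++ pageL (base + j + 1) pg := by
  simp [pageStepB, pageL, List.append_assoc]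

theorem innerB (chunk : List (List (String × List (List String)))) (base j0 : Int)
    (lines : List String) :
    (PySem.List.enumerate chunk j0).foldl (pageStepB base) lines =
      lines ++ bodyL (base + j0 + 1) chunk := by
  induction chunk generalizing j0 lines with
  | nil => simp [PySem.List.enumerate_nil, bodyL]
  | cons pg rest ih =>
    rw [PySem.List.enumerate_cons]
    simp only [List.foldl_cons, pageStepB_eq]
    rw [ih (j0 + 1)]
    simp [bodyL, List.append_assoc]
    ring_nf

theorem chunkB (pages : List (List (String × List (List String)))) (q : Nat) :
    PySem.List.slice pages (some ((q : Int) * 6)) (some (((q : Int) + 1) * 6)) =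
      (pages.drop (q * 6)).take 6 := by
  have h1 : (q : Int) * 6 = ((q * 6 : Nat) : Int) := by push_cast; ring
  have h2 : ((q : Int) + 1) * 6 = ((q * 6 : Nat) : Int) + ((6 : Nat) : Int) := by push_cast; ring
  rw [h1, h2, PySem.List.slice_natCast_add]

theorem lemB (pages : List (List (String × List (List String)))) (k : Nat) :
    ∀ (a : Int), 0 ≤ a → 1 ≤ k →
    a + k = max 1 (PySem.Int.floordiv ((pages.length : Int) + 6 - 1) 6) →
    ∀ (lines : List String),
    (PySem.List.pyRange a (max 1 (PySem.Int.floordiv ((pages.length : Int) + 6 - 1) 6)) 1).foldl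
        (partStepB pages) lines =
      lines ++ hdrP (a + 1) :: restL (a + 1) (6 * a + 1) (pages.drop (6 * a).toNat) := by
  induction k with
  | zero => intro a _ h1 _; omega
  | succ k ih =>
    intro a ha _ hsum lines
    have hfd : PySem.Int.floordiv ((pages.length : Int) + 6 - 1) 6 =
        ((pages.length : Int) + 5) / 6 := by
      rw [PySem.Int.floordiv_eq_ediv_of_pos (by norm_num)]; ring_nf
    have hsum' : a + ((k : Int) + 1) = max 1 (((pages.length : Int) + 5) / 6) := by
      rw [← hfd]; push_cast at hsum ⊢; omega
    rw [PySem.List.pyRange_one_cons (by rw [hfd]; omega), List.foldl_cons]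
    -- the current part block
    have haq : a = ((a.toNat : Nat) : Int) := by omega
    have hsl : PySem.List.slice pages (some (a * 6)) (some ((a + 1) * 6)) =
        (pages.drop (a.toNat * 6)).take 6 := by
      rw [haq]; exact chunkB pages a.toNat
    have hstep : partStepB pages lines a =
        lines ++ [hdrP (a + 1)] ++ bodyL (6 * a + 1) ((pages.drop (a.toNat * 6)).take 6) ++
          [hdrP (a + 1)] := by
      simp only [partStepB]
      rw [hsl, innerB _ _ 0 _]
      rw [show (a * 6 + 0 + 1) = 6 * a + 1 by ring]
      simp [hdrP, List.append_assoc]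
    by_cases hk : k = 0
    · -- last part: the remaining pages fit in it
      subst hk
      rw [PySem.List.pyRange_one_eq_nil (by rw [hfd]; omega), List.foldl_nil]
      have hfit : (pages.drop (6 * a).toNat).length ≤ 6 := by
        simp only [List.length_drop]; omega
      rw [hstep]
      rw [restL_le _ _ _ hfit]
      have hmul : a.toNat * 6 = (6 * a).toNat := by omega
      have htk : (pages.drop (6 * a).toNat).take 6 = pages.drop (6 * a).toNat :=
        List.take_of_length_le hfit
      rw [hmul, htk]
      simp [List.append_assoc]
    · -- at least one more part follows
      have hgt : ¬ ((pages.drop (6 * a).toNat).length ≤ 6) := by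
        simp only [List.length_drop]
        have h2 : a + 2 ≤ max 1 (((pages.length : Int) + 5) / 6) := by omega
        omega
      rw [hstep]
      rw [ih (a + 1) (by omega) (by omega) (by rw [hfd]; omega)]
      rw [restL_gt _ _ _ hgt]
      have hmul : a.toNat * 6 = (6 * a).toNat := by omega
      have hdd : (pages.drop (6 * a).toNat).drop 6 = pages.drop (6 * (a + 1)).toNat := by
        rw [List.drop_drop]; congr 1; omega
      have hgn : 6 * a + 1 + 6 = 6 * (a + 1) + 1 := by ring
      rw [hmul, hdd, hgn]
      simp [List.append_assoc]

theorem topB (pages : List (List (String × List (List String)))) :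
    assemble_final_text_alt pages = PySem.Str.join "\n" (hdrP 1 :: restL 1 1 pages) := by
  simp only [assemble_final_text_alt]
  have hk : (1 : Int) ≤ max 1 (PySem.Int.floordiv ((pages.length : Int) + 6 - 1) 6) :=
    le_max_left _ _
  have := lemB pages (max 1 (PySem.Int.floordiv ((pages.length : Int) + 6 - 1) 6)).toNat
    0 le_rfl (by omega) (by omega) []
  rw [this]
  norm_num

-- ===== VERDICT (by name: the statement is the Claim_ definition above) =====
theorem assemble_final_text_spec : Claim_equal_assemble_final_text := by
  intro pages _ _
  unfold Spec_assemble_final_text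
  rw [assemble_final_text, topB pages]
  have h := topA pages
  simp only at h
  rw [h]
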